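-- pv_equiv track=rewrite | github.com/Sathvik-Rao/ClipCascade | ClipCascade_Desktop/src/clipboard/clipboard_monitor_linux.py | convert_mime_to_generic_type
-- ===== SOURCE A (Python) =====
-- def convert_mime_to_generic_type(mime_list):
--     if "text/uri-list" in mime_list:
--         return "files"
--
--     if any(mime.startswith("image/") for mime in mime_list):
--         return "image"
--
--     text_mime = [
--         "text/plain",
--         "text/plain;charset=utf-8",
--         "STRING",
--         "TEXT",
--         "COMPOUND_TEXT",
--         "UTF8_STRING",
--     ]
--     if any(t_mime in mime_list for t_mime in text_mime):
--         return "text"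
--
--     return "unknown"
-- ===== SOURCE B (Python) =====
-- _TEXT_MIMES = {
--     "text/plain",
--     "text/plain;charset=utf-8",
--     "STRING",
--     "TEXT",
--     "COMPOUND_TEXT",
--     "UTF8_STRING",
-- }
--
-- def convert_mime_to_generic_type(mime_list):
--     has_files = has_image = has_text = False
--     for mime in mime_list:
--         if mime == "text/uri-list":
--             has_files = True
--         elif mime.startswith("image/"):
--             has_image = True
--         elif mime in _TEXT_MIMES:
--             has_text = True
--     if has_files:
--         return "files"
--     if has_image:
--         return "image"
--     if has_text:
--         return "text"
--     return "unknown"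
-- ===== Notes on version B (the rewrite author's own statement) =====
-- stated objective: alternative
-- what changed: Replaces A's three separate scans of the list (membership test, image-prefix any, text-MIME any) with one traversal maintaining three boolean flags, deciding by fixed priority files > image > text after the loop.
import Mathlib
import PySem

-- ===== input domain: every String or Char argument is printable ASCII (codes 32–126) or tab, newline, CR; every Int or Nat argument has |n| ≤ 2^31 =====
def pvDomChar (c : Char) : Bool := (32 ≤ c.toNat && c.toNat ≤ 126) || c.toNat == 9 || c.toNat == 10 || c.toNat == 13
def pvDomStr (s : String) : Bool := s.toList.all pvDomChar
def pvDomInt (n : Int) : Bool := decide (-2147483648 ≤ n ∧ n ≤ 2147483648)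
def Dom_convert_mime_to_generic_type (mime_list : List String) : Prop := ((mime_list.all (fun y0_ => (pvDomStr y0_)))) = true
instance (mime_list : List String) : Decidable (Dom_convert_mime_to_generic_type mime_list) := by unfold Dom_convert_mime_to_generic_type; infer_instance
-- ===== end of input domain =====

-- B replaces A's three separate scans of the list with one traversal maintaining
-- three boolean flags and a fixed priority decision (objective: alternative decomposition).

-- ===== PORT A =====
def pvTextMime : List String :=
  ["text/plain", "text/plain;charset=utf-8", "STRING", "TEXT", "COMPOUND_TEXT", "UTF8_STRING"]

def convert_mime_to_generic_type (mime_list : List String) : String :=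
  if mime_list.contains "text/uri-list" then "files"
  else if mime_list.any (fun mime => PySem.Str.startswith mime "image/") then "image"
  else if pvTextMime.any (fun t_mime => mime_list.contains t_mime) then "text"
  else "unknown"

-- ===== PORT B =====
def pvTextMimeSet : PySem.Set String :=
  PySem.Set.ofList
    ["text/plain", "text/plain;charset=utf-8", "STRING", "TEXT", "COMPOUND_TEXT", "UTF8_STRING"]

-- the single flag-accumulating loop of Source B
def pvAltLoop : List String → Bool × Bool × Bool → Bool × Bool × Bool
  | [], acc => acc
  | mime :: rest, (hf, hi, ht) =>
    pvAltLoop rest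
      (if mime == "text/uri-list" then (true, hi, ht)
       else if PySem.Str.startswith mime "image/" then (hf, true, ht)
       else if pvTextMimeSet.contains mime then (hf, hi, true)
       else (hf, hi, ht))

def convert_mime_to_generic_type_alt (mime_list : List String) : String :=
  match pvAltLoop mime_list (false, false, false) with
  | (hf, hi, ht) =>
    if hf then "files"
    else if hi then "image"
    else if ht then "text"
    else "unknown"

-- ===== PRECONDITION & SPEC =====
def Spec_convert_mime_to_generic_type (mime_list : List String) (out : String) : Prop := out = convert_mime_to_generic_type_alt mime_list
instance (mime_list : List String) (out : String) : Decidable (Spec_convert_mime_to_generic_type mime_list out) := by unfold Spec_convert_mime_to_generic_type; infer_instance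

-- ===== CLAIM (what is proved, stated in full; the proofs are below) =====
def Claim_equal_convert_mime_to_generic_type : Prop := ∀ (mime_list : List String), Dom_convert_mime_to_generic_type mime_list → Spec_convert_mime_to_generic_type mime_list (convert_mime_to_generic_type mime_list)

-- ===== LEMMAS AND PROOFS =====

-- per-element predicates of B's elif chain
def pvF (m : String) : Bool := m == "text/uri-list"
def pvI (m : String) : Bool := !pvF m && PySem.Str.startswith m "image/"
def pvT (m : String) : Bool := !pvF m && !PySem.Str.startswith m "image/" && pvTextMimeSet.contains m

theorem pvAltLoop_eq (l : List String) (hf hi ht : Bool) :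
    pvAltLoop l (hf, hi, ht) = (hf || l.any pvF, hi || l.any pvI, ht || l.any pvT) := by
  induction l generalizing hf hi ht with
  | nil => simp [pvAltLoop]
  | cons m rest ih =>
    simp only [pvAltLoop, List.any_cons, pvF, pvI, pvT]
    by_cases h1 : (m == "text/uri-list") = true <;>
      by_cases h2 : PySem.Str.startswith m "image/" = true <;>
        by_cases h3 : pvTextMimeSet.contains m = true <;>
          simp only [h1, h2, h3, if_pos, if_neg, Bool.not_eq_true] at * <;>
            simp [h1, h2, h3, ih, Bool.or_assoc, Bool.or_left_comm]

theorem convert_mime_to_generic_type_spec : Claim_equal_convert_mime_to_generic_type := by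
  intro l _
  unfold Spec_convert_mime_to_generic_type convert_mime_to_generic_type convert_mime_to_generic_type_alt
  rw [pvAltLoop_eq]
  simp only [Bool.false_or]
  have E1 : l.any pvF = l.contains "text/uri-list" := by
    rw [Bool.eq_iff_iff]
    simp only [List.any_eq_true, pvF, beq_iff_eq, List.contains_iff_mem]
    constructor
    · rintro ⟨m, hm, rfl⟩; exact hm
    · intro h; exact ⟨_, h, rfl⟩
  cases hF : l.any pvF with
  | true =>
    have hmem : "text/uri-list" ∈ l := by
      have := E1 ▸ hF; simpa using this
    simp [hmem, hF]
  | false =>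
    have hc : l.contains "text/uri-list" = false := E1 ▸ hF
    have hnotmem : "text/uri-list" ∉ l := by simpa using hc
    have E2 : l.any pvI = l.any (fun mime => PySem.Str.startswith mime "image/") := by
      rw [Bool.eq_iff_iff]
      simp only [List.any_eq_true, pvI, Bool.and_eq_true, Bool.not_eq_true']
      constructor
      · rintro ⟨m, hm, _, hsw⟩; exact ⟨m, hm, hsw⟩
      · rintro ⟨m, hm, hsw⟩
        refine ⟨m, hm, ?_, hsw⟩
        simp only [pvF, beq_eq_false_iff_ne, ne_eq]
        intro e; exact hnotmem (e ▸ hm)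
    cases hI : l.any (fun mime => PySem.Str.startswith mime "image/") with
    | true =>
      have hI' : l.any pvI = true := E2 ▸ hI
      have him : ∃ x ∈ l, PySem.Chars.startswith x.toList ['i', 'm', 'a', 'g', 'e', '/'] = true := by
        simpa using hI
      simp [hnotmem, hI', him]
    | false =>
      have hI' : l.any pvI = false := E2 ▸ hI
      have hnsw : ∀ m ∈ l, PySem.Str.startswith m "image/" = false := by
        intro m hm; exact Bool.eq_false_iff.mpr (List.any_eq_false.mp hI m hm)
      have hnim : ¬ ∃ x ∈ l, PySem.Chars.startswith x.toList ['i', 'm', 'a', 'g', 'e', '/'] = true := by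
        simpa using hI
      have hset : pvTextMimeSet = pvTextMime := by decide
      have hne : ∀ s ∈ pvTextMime, s ≠ "text/uri-list" := by decide
      have E3 : l.any pvT = pvTextMime.any (fun t_mime => l.contains t_mime) := by
        rw [Bool.eq_iff_iff]
        simp only [List.any_eq_true, pvT, Bool.and_eq_true, Bool.not_eq_true',
          List.contains_iff_mem, hset, PySem.Set.contains_iff]
        constructor
        · rintro ⟨m, hm, ⟨_, _⟩, hmem⟩; exact ⟨m, hmem, hm⟩
        · rintro ⟨t, htm, htl⟩
          refine ⟨t, htl, ⟨?_, hnsw t htl⟩, htm⟩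
          simp only [pvF, beq_eq_false_iff_ne, ne_eq]
          exact hne t htm
      cases hT : l.any pvT with
      | true =>
        have htx : ∃ x ∈ pvTextMime, x ∈ l := by
          have := E3 ▸ hT; simpa using this
        simp [hnotmem, hnim, hI', hT, htx]
      | false =>
        have hntx : ¬ ∃ x ∈ pvTextMime, x ∈ l := by
          have := E3 ▸ hT; simpa using this
        simp [hnotmem, hnim, hI', hT, hntx]
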